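-- pv_equiv track=rewrite | github.com/FAndersson/polynomials_on_simplices | polynomials_on_simplices/generic_tools/str_utils.py | str_dot_product
-- ===== SOURCE A (Python) =====
-- def str_sum(a, b):
--     r"""
--     Generate the string for the sum of two values, given by strings.
--
--     :param str a: First value in the sum.
--     :param str b: Second value in the sum.
--     :return: String for the sum of the two values.
--     :rtype: str
--
--     .. rubric:: Examples
--
--     >>> str_sum("a1", "a2")
--     'a1 + a2'
--     >>> str_sum("a1", "-a2")
--     'a1 - a2'
--     >>> str_sum("a1", "0")
--     'a1'
--     >>> str_sum("0", "-a2")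
--     '-a2'
--     >>> str_sum("-a1", "1")
--     '-a1 + 1'
--     """
--     if a == "0":
--         return b
--     if b == "0":
--         return a
--     if b.startswith("-"):
--         return a + " - " + b[1:]
--     else:
--         return a + " + " + b
--
-- def str_product(a, b, multiplication_character=""):
--     r"""
--     Generate the string for the product of two values, given by strings.
--
--     :param str a: First value in the product.
--     :param str b: Second value in the product.
--     :param str multiplication_character: Character(s) used to represent the product operator.
--     :return: String for the product of the two values.
--     :rtype: str
--
--     .. rubric:: Examples
--
--     >>> str_product("a1", "a2")
--     'a1 a2'
--     >>> str_product("a1", "-a2", multiplication_character="\\times")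
--     '-a1 \\times a2'
--     >>> str_product("a1", "0")
--     '0'
--     >>> str_product("a1", "1")
--     'a1'
--     """
--     if a == "0" or b == "0":
--         return "0"
--     if a == "1":
--         return b
--     if b == "1":
--         return a
--     if a.startswith("-"):
--         if b.startswith("-"):
--             return str_product(a[1:], b[1:], multiplication_character)
--         else:
--             return "-" + str_product(a[1:], b, multiplication_character)
--     else:
--         if b.startswith("-"):
--             return "-" + str_product(a, b[1:], multiplication_character)
--         else:
--             if multiplication_character != "":
--                 return a + " " + multiplication_character + " " + b
--             else:
--                 return a + " " + b
--
-- def str_dot_product(a, b, multiplication_character=""):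
--     r"""
--     Generate the string for a dot product of two arrays, with array elements given by strings.
--
--     :param List[str] a: First array of elements in the dot product.
--     :param List[str] b: Second array of elements in the dot product.
--     :param str multiplication_character: Character(s) used to represent the product operator.
--     :return: String for the dot product of the two arrays.
--     :rtype: str
--
--     .. rubric:: Examples
--
--     >>> str_dot_product(["a1", "a2"], ["b1", "b2"])
--     'a1 b1 + a2 b2'
--     >>> str_dot_product(["a1", "a2"], ["b1", "b2"], multiplication_character="\\cdot")
--     'a1 \\cdot b1 + a2 \\cdot b2'
--     """
--     try:
--         len(a)
--         assert len(a) == len(b)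
--     except TypeError:
--         return str_product(a, b, multiplication_character)
--
--     res = "0"
--     for i in range(len(a)):
--         p = str_product(a[i], b[i], multiplication_character)
--         res = str_sum(res, p)
--     return res
-- ===== SOURCE B (Python) =====
-- def str_product(a, b, multiplication_character=""):
--     if a == "0" or b == "0":
--         return "0"
--     if a == "1":
--         return b
--     if b == "1":
--         return a
--     if a.startswith("-"):
--         if b.startswith("-"):
--             return str_product(a[1:], b[1:], multiplication_character)
--         else:
--             return "-" + str_product(a[1:], b, multiplication_character)
--     else:
--         if b.startswith("-"):
--             return "-" + str_product(a, b[1:], multiplication_character)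
--         else:
--             if multiplication_character != "":
--                 return a + " " + multiplication_character + " " + b
--             else:
--                 return a + " " + b
--
--
-- def str_dot_product(a, b, multiplication_character=""):
--     # Builds the sum back-to-front: traverse the pairs in REVERSE order and
--     # PREPEND each nonzero term to the string built so far.  Correct because
--     # the sum-joining operation is associative with "0" as neutral element,
--     # so the result does not depend on the traversal direction.
--     try:
--         len(a)
--         assert len(a) == len(b)
--     except TypeError:
--         return str_product(a, b, multiplication_character)
--
--     res = "0"
--     for x, y in reversed(list(zip(a, b))):
--         t = str_product(x, y, multiplication_character)
--         if t == "0":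
--             continue
--         if res == "0":
--             res = t
--         elif res.startswith("-"):
--             res = t + " - " + res[1:]
--         else:
--             res = t + " + " + res
--     return res
-- ===== Notes on version B (the rewrite author's own statement) =====
-- stated objective: alternative
-- what changed: Instead of A's left-to-right fold that appends each new term to a growing accumulator via str_sum, B traverses the zipped pairs in reverse and PREPENDS each nonzero term (turning the suffix's leading '-' into ' - '), building the output back-to-front; correctness rests on associativity of the sum-join with neutral '0'.
-- outside the precondition, e.g. on str_dot_product(['a1', 'a2'], ['b1'], ''): A raises AssertionError, B raises AssertionError
import Mathlib
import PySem

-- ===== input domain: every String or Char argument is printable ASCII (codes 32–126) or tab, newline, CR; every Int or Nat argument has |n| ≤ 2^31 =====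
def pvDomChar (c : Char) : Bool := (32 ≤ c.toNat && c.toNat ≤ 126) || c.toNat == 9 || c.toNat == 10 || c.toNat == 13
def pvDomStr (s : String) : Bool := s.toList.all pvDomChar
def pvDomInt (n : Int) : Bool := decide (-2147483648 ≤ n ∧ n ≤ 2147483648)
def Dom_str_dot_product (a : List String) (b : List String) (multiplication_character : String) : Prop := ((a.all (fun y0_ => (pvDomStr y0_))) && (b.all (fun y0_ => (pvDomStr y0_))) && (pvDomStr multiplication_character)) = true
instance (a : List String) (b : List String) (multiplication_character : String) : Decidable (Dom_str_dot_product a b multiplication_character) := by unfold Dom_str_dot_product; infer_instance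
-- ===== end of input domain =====

-- B traverses the zipped pairs in REVERSE and PREPENDS each nonzero term, building the output
-- back-to-front; A folds left-to-right appending via str_sum (objective: alternative, same cost).
-- Both Pythons share helper str_product; it is ported once. String code is ported over List Char
-- (exact per code point: '==', 'startswith("-")', '[1:]' and '+' act on code points).

-- ===== PORT A =====
-- shared helper str_product (Python's recursion on a[1:]/b[1:]; measure = total length)
def strProductAux : List Char → List Char → String → List Char
  | a, b, mc =>
    if a = ['0'] ∨ b = ['0'] then ['0']
    else if a = ['1'] then b
    else if b = ['1'] then a
    else
      match a, b with
      | '-' :: a', '-' :: b' => strProductAux a' b' mc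
      | '-' :: a', b => '-' :: strProductAux a' b mc
      | a, '-' :: b' => '-' :: strProductAux a b' mc
      | a, b =>
        if mc ≠ "" then a ++ [' '] ++ mc.toList ++ [' '] ++ b
        else a ++ [' '] ++ b
  termination_by a b _ => a.length + b.length
  decreasing_by all_goals (simp_all; try omega)

-- helper str_sum (used by A's loop); b.startswith("-") is head? = '-', b[1:] is tail
def strSum (a b : List Char) : List Char :=
  if a = ['0'] then b
  else if b = ['0'] then a
  else if b.head? = some '-' then a ++ [' ', '-', ' '] ++ b.tail
  else a ++ [' ', '+', ' '] ++ b

-- the try/len/assert guard: len(a) always succeeds on a list, so the TypeError branch is dead;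
-- the assert raises AssertionError (uncaught) when the lengths differ — excluded by Pre_ below.
def str_dot_product (a : List String) (b : List String) (multiplication_character : String) : String :=
  String.ofList
    ((PySem.List.pyRange 0 a.length 1).foldl
      (fun res i =>
        strSum res (strProductAux (PySem.List.pyGetD a i "").toList
                                  (PySem.List.pyGetD b i "").toList multiplication_character))
      ['0'])

-- ===== PORT B =====
-- reversed(list(zip(a, b))) loop, prepending each nonzero term to the accumulator
def str_dot_product_alt (a : List String) (b : List String) (multiplication_character : String) : String :=
  String.ofList
    (((a.zip b).reverse).foldl
      (fun res p =>
        let t := strProductAux p.1.toList p.2.toList multiplication_character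
        if t = ['0'] then res
        else if res = ['0'] then t
        else if res.head? = some '-' then t ++ [' ', '-', ' '] ++ res.tail
        else t ++ [' ', '+', ' '] ++ res)
      ['0'])

-- ===== PRECONDITION & SPEC =====
-- Pre_ excludes exactly the inputs where A's 'assert len(a) == len(b)' raises AssertionError.
def Pre_str_dot_product (a : List String) (b : List String) (multiplication_character : String) : Prop :=
  a.length = b.length
instance (a : List String) (b : List String) (multiplication_character : String) : Decidable (Pre_str_dot_product a b multiplication_character) := by unfold Pre_str_dot_product; infer_instance

def pvWitness_str_dot_product : List String × List String × String := (["a1", "a2"], ["b1", "b2"], "")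

def Spec_str_dot_product (a : List String) (b : List String) (multiplication_character : String) (out : String) : Prop := out = str_dot_product_alt a b multiplication_character
instance (a : List String) (b : List String) (multiplication_character : String) (out : String) : Decidable (Spec_str_dot_product a b multiplication_character out) := by unfold Spec_str_dot_product; infer_instance

-- ===== CLAIM (what is proved, stated in full; the proofs are below) =====
def Claim_equal_str_dot_product : Prop := ∀ (a : List String) (b : List String) (multiplication_character : String), Dom_str_dot_product a b multiplication_character → Pre_str_dot_product a b multiplication_character → Spec_str_dot_product a b multiplication_character (str_dot_product a b multiplication_character)

-- ===== LEMMAS AND PROOFS =====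

theorem strSum_zero_left (p : List Char) : strSum ['0'] p = p := by
  simp [strSum]

theorem strSum_zero_right (r : List Char) : strSum r ['0'] = r := by
  unfold strSum
  split_ifs with h <;> simp_all

-- the separator block str_sum appends when both arguments are nonzero
def sepB (b : List Char) : List Char :=
  if b.head? = some '-' then ' ' :: '-' :: ' ' :: b.tail else ' ' :: '+' :: ' ' :: b

theorem strSum_eq_append (a b : List Char) (ha : a ≠ ['0']) (hb : b ≠ ['0']) :
    strSum a b = a ++ sepB b := by
  unfold strSum sepB; split_ifs <;> simp_all

theorem append_sepB_ne_zero (a b : List Char) : a ++ sepB b ≠ ['0'] := by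
  intro he
  have hl := congrArg List.length he
  unfold sepB at hl
  split_ifs at hl <;> simp [List.length_append] at hl <;> omega

theorem sepB_head (b : List Char) : (sepB b).head? = some ' ' := by
  unfold sepB; split_ifs <;> rfl

theorem sepB_append (t l : List Char) (hl : l.head? = some ' ') :
    sepB (t ++ l) = sepB t ++ l := by
  cases t with
  | nil => simp [sepB, hl]
  | cons c t' => by_cases hc : c = '-' <;> simp [sepB, hc]

theorem strSum_assoc (r t s : List Char) :
    strSum (strSum r t) s = strSum r (strSum t s) := by
  by_cases hr : r = ['0']
  · subst hr; rw [strSum_zero_left, strSum_zero_left]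
  by_cases ht : t = ['0']
  · subst ht; rw [strSum_zero_right, strSum_zero_left]
  by_cases hs : s = ['0']
  · subst hs; rw [strSum_zero_right, strSum_zero_right]
  rw [strSum_eq_append r t hr ht, strSum_eq_append t s ht hs,
      strSum_eq_append _ s (append_sepB_ne_zero r t) hs,
      strSum_eq_append r _ hr (append_sepB_ne_zero t s),
      sepB_append t (sepB s) (sepB_head s), List.append_assoc]

theorem foldl_strSum_eq_strSum_foldr (ps : List (List Char)) :
    ∀ r : List Char, ps.foldl strSum r = strSum r (ps.foldr strSum ['0']) := by
  induction ps with
  | nil => intro r; exact (strSum_zero_right r).symm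
  | cons p ps ih =>
    intro r
    rw [List.foldl_cons, ih (strSum r p), List.foldr_cons, strSum_assoc]

-- A's index loop over range(len(a)) equals a fold over the zipped lists when the lengths agree
theorem foldl_range_two_lists {α β : Type} (a : List α) (b : List α) (d : α)
    (g : β → α → α → β) (init : β) (h : a.length = b.length) :
    (PySem.List.pyRange 0 a.length 1).foldl
        (fun r i => g r (PySem.List.pyGetD a i d) (PySem.List.pyGetD b i d)) init
      = (a.zip b).foldl (fun r p => g r p.1 p.2) init := by
  have hlen : (a.length : Int) = ((a.zip b).length : Int) := by
    simp [List.length_zip, h]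
  have key : ∀ (acc : β), ∀ i ∈ PySem.List.pyRange 0 ((a.zip b).length : Int) 1,
      g acc (PySem.List.pyGetD a i d) (PySem.List.pyGetD b i d)
        = (fun (r : β) (p : α × α) => g r p.1 p.2) acc (PySem.List.pyGetD (a.zip b) i (d, d)) := by
    intro acc i hi
    rw [PySem.List.mem_pyRange_one] at hi
    obtain ⟨h0, h1⟩ := hi
    have hia : i < (a.length : Int) := by rw [hlen]; exact h1
    have hib : i < (b.length : Int) := by rw [← h]; exact hia
    rw [PySem.List.pyGetD_eq_getElem a d h0 hia,
        PySem.List.pyGetD_eq_getElem b d h0 hib,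
        PySem.List.pyGetD_eq_getElem (a.zip b) (d, d) h0 h1]
    simp [List.getElem_zip]
  rw [hlen, PySem.List.foldl_congr_mem _ _ _ init key]
  exact PySem.List.foldl_pyRange_zero_pyGetD' (a.zip b) (d, d) (fun r p => g r p.1 p.2) init

-- B's reversed-prepend step IS strSum with the arguments swapped
theorem alt_step_eq_strSum (mc : String) :
    (fun (res : List Char) (p : String × String) =>
        let t := strProductAux p.1.toList p.2.toList mc
        if t = ['0'] then res
        else if res = ['0'] then t
        else if res.head? = some '-' then t ++ [' ', '-', ' '] ++ res.tail
        else t ++ [' ', '+', ' '] ++ res)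
      = fun res p => strSum (strProductAux p.1.toList p.2.toList mc) res := by
  funext res p
  simp only [strSum]

-- ===== VERDICT (by name: the statement is the Claim_ definition above) =====
theorem str_dot_product_spec : Claim_equal_str_dot_product := by
  intro a b mc _ hpre
  show str_dot_product a b mc = str_dot_product_alt a b mc
  simp only [str_dot_product, str_dot_product_alt]
  rw [foldl_range_two_lists a b ""
        (fun r x y => strSum r (strProductAux x.toList y.toList mc)) ['0'] hpre]
  rw [alt_step_eq_strSum mc, List.foldl_reverse]
  rw [← List.foldl_map (f := fun (p : String × String) => strProductAux p.1.toList p.2.toList mc)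
        (g := strSum)]
  rw [← List.foldr_map (f := fun (p : String × String) => strProductAux p.1.toList p.2.toList mc)
        (g := strSum)]
  rw [foldl_strSum_eq_strSum_foldr, strSum_zero_left]
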